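/- GENERATED by mk_final_copies.py from the proof of the farm's unit `vorbis_decode_packet_rest.4` (farm:vorbis_decode_packet_rest.4.2: Proof.lean) as the
   re-elaboration sweep compiled it — do not edit. -/
import Asan.CheckWalk
import Vorbis.Spec.Units.vorbis_decode_packet_rest_4
import Vorbis.Spec.PacketRestFrame
import Vorbis.Spec.Worked.vorbis_decode_packet_rest_4_Lemmas

open X86 X86.User Asan Vorbis Vorbis.Spec Vorbis.Spec.vorbis_decode_packet_rest

set_option maxRecDepth 4000
set_option maxHeartbeats 4000000

namespace Vorbis.Spec.vorbis_decode_packet_rest_4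

/-- The two stack arguments `[rsp + 8, rsp + 24)` of the function's entry state lie inside the stack region: `Args.args_top`
(contracts 2: `len_above` / `left_above`), in the form the lemmas of Lemmas.lean take it. -/
theorem seg4_argsIn {u₀ : State} {others : List Obj} {frames : List (Nat × FrameLayout)} {len : Nat} {Ar : Arena}
    {stored room : Int} {mode : Nat} {ysz : Nat → Nat} {e : State} {ret : Word} {i j : Nat} {v : State}
    (hat : At4 u₀ others frames len Ar stored room mode ysz e ret i j v) : ArgsIn e :=
  hat.pre.2.2.args_top

end Vorbis.Spec.vorbis_decode_packet_rest_4

/-- Segment .4 of `vorbis_decode_packet_rest` (0x110c92–0x110e56 + 0x110e74–0x110e79, lines 3252–3261 and the latch of 3242): the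
whole `k` loop. The loop (`seg4_of_round`, measure `8 − k`) over one round, the round from five sub-segments (`seg4_of_parts`):
A (loop test, `book = subclass_books[pclass][cval & csub]`, the `book < 0` arm, the exit `++j`), B (`c = f->codebooks + book`,
prep_huffman), C (the inline DECODE and codebook_decode_scalar_raw), D (`sorted_values[var]`), E (`finalY[offset++] = temp`). -/
theorem Vorbis.Spec.Worked.vorbis_decode_packet_rest_4_ok : Vorbis.Spec.vorbis_decode_packet_rest_4.Statement := by
  unfold Vorbis.Spec.vorbis_decode_packet_rest_4.Statement
  intro Lay hLay μ hμ u₀ hcode h_prep h_raw hl1 hl8 hl4 hs2 hl2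
  intro others frames len Ar stored room mode ysz e ret i j v hat
  have hin := Vorbis.Spec.vorbis_decode_packet_rest_4.seg4_argsIn hat
  exact Vorbis.Spec.vorbis_decode_packet_rest_4.seg4_of_parts
    (Vorbis.Spec.vorbis_decode_packet_rest_4.segA hLay hμ hcode hl2 hs2)
    (Vorbis.Spec.vorbis_decode_packet_rest_4.segB hLay hμ hcode h_prep hl8 hl4)
    (Vorbis.Spec.vorbis_decode_packet_rest_4.segC hLay hμ hcode h_raw hl1 hl2 hl8 hl4)
    (Vorbis.Spec.vorbis_decode_packet_rest_4.segD hLay hμ hcode hl1 hl8 hl4)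
    (Vorbis.Spec.vorbis_decode_packet_rest_4.segE hLay hμ hcode hs2)
    others frames len Ar stored room mode ysz e ret i j v hat hin
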